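-- pv_equiv track=rewrite | github.com/maxmetalist/- | src/filters.py | get_description_dict
-- ===== SOURCE A (Python) =====
-- from collections import Counter
--
-- def get_description_dict(transactions, descriptions):
--     """функция подсчёта количества операций в каждой категории"""
--     my_outer_dict = {}
--     description_list = []
--     for transaction in transactions:
--         if transaction.get("description"):
--             description_list.append(transaction["description"])
--     counter = Counter(description_list)
--     for key, value in counter.items():
--         if key.lower() in descriptions:
--             my_outer_dict[key] = value
--
--     return my_outer_dict
-- ===== SOURCE B (Python) =====
-- def get_description_dict(transactions, descriptions):
--     """функция подсчёта количества операций в каждой категории"""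
--     result = {}
--     for transaction in transactions:
--         description = transaction.get("description")
--         if description and description.lower() in descriptions:
--             result[description] = result.get(description, 0) + 1
--     return result
-- ===== Notes on version B (the rewrite author's own statement) =====
-- stated objective: simpler
-- what changed: B replaces A's three-pass pipeline (build a description list, Counter it, then filter the counter's items into a new dict) by a single accumulate-and-filter pass over the transactions with one plain dict.
import Mathlib
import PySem

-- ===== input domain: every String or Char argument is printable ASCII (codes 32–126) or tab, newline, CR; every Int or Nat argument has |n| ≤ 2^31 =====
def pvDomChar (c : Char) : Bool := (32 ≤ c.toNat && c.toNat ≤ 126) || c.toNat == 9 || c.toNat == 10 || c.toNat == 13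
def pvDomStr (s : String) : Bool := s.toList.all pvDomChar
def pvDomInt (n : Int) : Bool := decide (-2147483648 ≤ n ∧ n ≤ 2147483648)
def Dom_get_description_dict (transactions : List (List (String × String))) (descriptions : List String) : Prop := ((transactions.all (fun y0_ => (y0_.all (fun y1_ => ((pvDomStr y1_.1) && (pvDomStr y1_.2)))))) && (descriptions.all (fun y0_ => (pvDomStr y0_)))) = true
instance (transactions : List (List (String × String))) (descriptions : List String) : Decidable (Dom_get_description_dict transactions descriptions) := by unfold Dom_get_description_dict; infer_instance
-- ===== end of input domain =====

-- B replaces A's three-pass pipeline (description list, Counter, filter into a dict) by one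
-- accumulate-and-filter pass over the transactions with a single dict ("simpler").

-- ===== PORT A =====
def get_description_dict (transactions : List (List (String × String))) (descriptions : List String) : List (String × Int) :=
  let description_list : List String := transactions.foldl (fun acc t =>
    match (PySem.Dict.mk t).get? "description" with
    | some s => if s ≠ "" then acc ++ [s] else acc
    | none => acc) []
  let counter : PySem.Dict String Int := PySem.Dict.counter description_list
  let my_outer_dict : PySem.Dict String Int := counter.items.foldl (fun d kv =>
    if PySem.Str.lower kv.1 ∈ descriptions then d.insert kv.1 kv.2 else d) PySem.Dict.empty
  my_outer_dict.items

-- ===== PORT B =====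
def get_description_dict_alt (transactions : List (List (String × String))) (descriptions : List String) : List (String × Int) :=
  (transactions.foldl (fun d t =>
    match (PySem.Dict.mk t).get? "description" with
    | some s =>
        if s ≠ "" ∧ PySem.Str.lower s ∈ descriptions then d.insert s (d.getD s 0 + 1) else d
    | none => d) (PySem.Dict.empty : PySem.Dict String Int)).items

-- ===== PRECONDITION & SPEC =====
def Spec_get_description_dict (transactions : List (List (String × String))) (descriptions : List String) (out : List (String × Int)) : Prop := out = get_description_dict_alt transactions descriptions
instance (transactions : List (List (String × String))) (descriptions : List String) (out : List (String × Int)) : Decidable (Spec_get_description_dict transactions descriptions out) := by unfold Spec_get_description_dict; infer_instance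

-- ===== CLAIM (what is proved, stated in full; the proofs are below) =====
def Claim_equal_get_description_dict : Prop := ∀ (transactions : List (List (String × String))) (descriptions : List String), Dom_get_description_dict transactions descriptions → Spec_get_description_dict transactions descriptions (get_description_dict transactions descriptions)

-- ===== LEMMAS AND PROOFS =====

-- the description list A extracts, as a structural recursion
def pvDlist : List (List (String × String)) → List String
  | [] => []
  | t :: ts =>
    match (PySem.Dict.mk t).get? "description" with
    | some s => if s ≠ "" then s :: pvDlist ts else pvDlist ts
    | none => pvDlist ts

lemma pvDlist_spec (ts : List (List (String × String))) :
    ∀ acc : List String,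
      ts.foldl (fun acc t =>
        match (PySem.Dict.mk t).get? "description" with
        | some s => if s ≠ "" then acc ++ [s] else acc
        | none => acc) acc = acc ++ pvDlist ts := by
  induction ts with
  | nil => simp [pvDlist]
  | cons t ts ih =>
    intro acc
    simp only [List.foldl_cons, pvDlist]
    cases h : (PySem.Dict.mk t).get? "description" with
    | none => exact ih acc
    | some s =>
      by_cases hs : s ≠ ""
      · simp only [if_pos hs, ih (acc ++ [s]), List.append_assoc, List.singleton_append]
      · simp only [if_neg hs]; exact ih acc

-- a loop that skips the elements failing P is the loop over the filtered list
lemma pvFoldl_ite {α β : Type} (P : α → Prop) [DecidablePred P] (f : β → α → β) :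
    ∀ (l : List α) (d : β),
      l.foldl (fun d x => if P x then f d x else d) d
        = (l.filter (fun x => decide (P x))).foldl f d := by
  intro l
  induction l with
  | nil => intro d; rfl
  | cons x l ih =>
    intro d
    by_cases hx : P x <;> simp [hx, ih]

-- B's loop over the transactions is the conditional-increment loop over A's description list
lemma pvB_loop (descriptions : List String) (ts : List (List (String × String))) :
    ∀ d : PySem.Dict String Int,
      ts.foldl (fun d t =>
        match (PySem.Dict.mk t).get? "description" with
        | some s =>
            if s ≠ "" ∧ PySem.Str.lower s ∈ descriptions then d.insert s (d.getD s 0 + 1) else d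
        | none => d) d
      = (pvDlist ts).foldl (fun d s =>
          if PySem.Str.lower s ∈ descriptions then d.insert s (d.getD s 0 + 1) else d) d := by
  induction ts with
  | nil => intro d; rfl
  | cons t ts ih =>
    intro d
    simp only [List.foldl_cons, pvDlist]
    cases h : (PySem.Dict.mk t).get? "description" with
    | none => exact ih d
    | some s =>
      by_cases hs : s ≠ ""
      · by_cases hq : PySem.Str.lower s ∈ descriptions
        · simp only [if_pos hs, if_pos (And.intro hs hq), List.foldl_cons, if_pos hq]; apply ih
        · simp only [if_pos hs, if_neg (fun c : _ ∧ _ => hq c.2), List.foldl_cons, if_neg hq]; apply ih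
      · simp only [if_neg hs, if_neg (fun c : _ ∧ _ => hs c.1)]; apply ih

-- set(filter) = filter(set)
lemma pvOfList_filter (q : String → Bool) (l : List String) :
    PySem.Set.ofList (l.filter q) = (PySem.Set.ofList l).filter q := by
  induction l using List.reverseRecOn with
  | nil => rfl
  | append_singleton xs x ih =>
    rw [List.filter_append, List.filter_singleton, PySem.Set.ofList_append_singleton,
      PySem.Set.add_eq_ite]
    by_cases hq : q x = true
    · simp only [hq, cond_true]
      rw [PySem.Set.ofList_append_singleton, ih, PySem.Set.add_eq_ite]
      by_cases hx : x ∈ PySem.Set.ofList xs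
      · rw [if_pos hx, if_pos (by simp [List.mem_filter, hx, hq])]
      · rw [if_neg hx, if_neg (fun hc => hx (List.mem_of_mem_filter hc)), List.filter_append,
          List.filter_singleton]
        simp [hq]
    · simp only [hq, cond_false, List.append_nil, ih]
      by_cases hx : x ∈ PySem.Set.ofList xs
      · rw [if_pos hx]
      · rw [if_neg hx, List.filter_append, List.filter_singleton]
        simp [hq]

-- ===== VERDICT (by name: the statement is the Claim_ definition above) =====
theorem get_description_dict_spec : Claim_equal_get_description_dict := by
  intro transactions descriptions _
  unfold Spec_get_description_dict get_description_dict get_description_dict_alt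
  dsimp only
  -- rewrite both sides in terms of L and q
  rw [pvDlist_spec, pvB_loop, List.nil_append]
  set L : List String := pvDlist transactions with hL
  set q : String → Bool := fun s => decide (PySem.Str.lower s ∈ descriptions) with hq
  rw [
    pvFoldl_ite (β := PySem.Dict String Int) (fun s => PySem.Str.lower s ∈ descriptions)
      (fun d s => d.insert s (d.getD s 0 + 1)) L,
    pvFoldl_ite (β := PySem.Dict String Int) (fun kv : String × Int => PySem.Str.lower kv.1 ∈ descriptions)
      (fun d kv => d.insert kv.1 kv.2) (PySem.Dict.counter L).items,
    PySem.Dict.foldl_insert_getD_add_one_eq_counter]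
  -- the B side: items of the counter of the filtered list
  rw [PySem.Dict.items_counter, PySem.Dict.items_counter]
  -- the A side: the filtered-items insertion loop just rebuilds the filtered items list
  have hA : ((PySem.Set.ofList L).map (fun k => (k, (L.count k : Int)))).filter
      (fun kv => decide (PySem.Str.lower kv.1 ∈ descriptions))
      = ((PySem.Set.ofList L).filter q).map (fun k => (k, (L.count k : Int))) := by
    rw [List.filter_map]; rfl
  have hnd : (((PySem.Set.ofList L).filter q).map (fun k => (k, (L.count k : Int)))).map Prod.fst
      = (PySem.Set.ofList L).filter q := by
    simp [Function.comp_def]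
  rw [hA]
  rw [PySem.Dict.items_foldl_insert_fresh
      (((PySem.Set.ofList L).filter q).map (fun k => (k, (L.count k : Int))))
      Prod.fst Prod.snd PySem.Dict.empty ?_ ?_]
  · rw [pvOfList_filter]
    simp only [PySem.Dict.empty, List.nil_append, List.map_map]
    refine List.map_congr_left ?_
    intro k hk
    have hqk : q k = true := List.of_mem_filter hk
    rw [List.count_filter (p := fun x => decide (PySem.Str.lower x ∈ descriptions)) hqk]
    rfl
  · intro a _; exact PySem.Dict.contains_empty _
  · rw [hnd]; exact (PySem.Set.nodup_ofList L).filter q
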